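-- pv_equiv track=rewrite | github.com/mikewoudenberg/AOC-2019 | assignment17.py | toOutput
-- ===== SOURCE A (Python) =====
-- def toOutput(instr):
--     result = []
--     preDigit = False
--     for i in instr:
--         if i.isdigit():
--             result.append(i)
--             preDigit = True
--         elif preDigit:
--             result.append(',')
--             result.append(i)
--             result.append(',')
--             preDigit = False
--         else:
--             result.append(i)
--             result.append(',')
--             preDigit = False
--     if result[-1] == ',':
--         result[-1] = '\n'
--     else:
--         result.append('\n')
--     return result
-- ===== SOURCE B (Python) =====
-- def toOutput(instr):
--     tokens = []
--     i, n = 0, len(instr)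
--     while i < n:
--         j = i
--         while j < n and instr[j].isdigit():
--             j += 1
--         if j > i:
--             tokens.append(instr[i:j])
--             i = j
--         else:
--             tokens.append(instr[i])
--             i += 1
--     return list(','.join(tokens)) + ['\n']
-- ===== Notes on version B (the rewrite author's own statement) =====
-- stated objective: simpler
-- what changed: B replaces A's per-character preDigit state machine by tokenising the string into maximal digit runs and single characters and comma-joining the tokens, appending the newline unconditionally.
import Mathlib
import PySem

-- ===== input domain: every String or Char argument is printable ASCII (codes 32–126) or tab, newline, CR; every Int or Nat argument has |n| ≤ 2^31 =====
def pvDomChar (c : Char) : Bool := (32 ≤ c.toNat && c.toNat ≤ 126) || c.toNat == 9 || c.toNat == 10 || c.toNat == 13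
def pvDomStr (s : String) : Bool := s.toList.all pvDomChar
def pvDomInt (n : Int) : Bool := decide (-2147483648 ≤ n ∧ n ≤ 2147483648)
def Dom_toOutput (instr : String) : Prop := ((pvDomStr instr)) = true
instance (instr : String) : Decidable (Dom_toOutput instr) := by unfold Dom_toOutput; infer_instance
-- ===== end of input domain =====

-- B formats instructions by splitting off maximal digit runs as tokens and comma-joining them,
-- instead of A's per-character preDigit flag machine; objective: simpler (same return value;
-- no observable mutation).

-- ===== PORT A =====
def toOutput (instr : String) : List String :=
  let st := instr.toList.foldl
    (fun (st : List String × Bool) (i : Char) =>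
      if PySem.Chars.isdigit i then (st.1 ++ [String.ofList [i]], true)
      else if st.2 then (st.1 ++ [",", String.ofList [i], ","], false)
      else (st.1 ++ [String.ofList [i], ","], false))
    ([], false)
  if PySem.List.pyGet? st.1 (-1) = some "," then st.1.dropLast ++ ["\n"]
  else st.1 ++ ["\n"]

-- ===== PORT B =====
-- B's outer while loop: each step consumes one maximal digit run (the inner while) or one character.
def altTokens (l : List Char) : List String :=
  match l with
  | [] => []
  | c :: cs =>
    if PySem.Chars.isdigit c then
      String.ofList (c :: cs.takeWhile PySem.Chars.isdigit)
        :: altTokens (cs.dropWhile PySem.Chars.isdigit)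
    else
      String.ofList [c] :: altTokens cs
termination_by l.length
decreasing_by
  · exact Nat.lt_succ_of_le (List.length_dropWhile_le _ _)
  · exact Nat.lt_succ_self _

def toOutput_alt (instr : String) : List String :=
  (PySem.Str.join "," (altTokens instr.toList)).toList.map (fun c => String.ofList [c]) ++ ["\n"]

-- ===== PRECONDITION & SPEC =====
-- Pre_ excludes only the empty string, on which A raises IndexError (result[-1] of []).
def Pre_toOutput (instr : String) : Prop := instr ≠ ""
instance (instr : String) : Decidable (Pre_toOutput instr) := by unfold Pre_toOutput; infer_instance
def pvWitness_toOutput : String := "R,8,L12"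

def Spec_toOutput (instr : String) (out : List String) : Prop := out = toOutput_alt instr
instance (instr : String) (out : List String) : Decidable (Spec_toOutput instr out) := by unfold Spec_toOutput; infer_instance

-- ===== CLAIM (what is proved, stated in full; the proofs are below) =====
def Claim_equal_toOutput : Prop := ∀ (instr : String), Dom_toOutput instr → Pre_toOutput instr → Spec_toOutput instr (toOutput instr)

-- ===== LEMMAS AND PROOFS =====

-- char-level view of B's tokens
def tokC (l : List Char) : List (List Char) :=
  match l with
  | [] => []
  | c :: cs =>
    if PySem.Chars.isdigit c then
      (c :: cs.takeWhile PySem.Chars.isdigit) :: tokC (cs.dropWhile PySem.Chars.isdigit)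
    else
      [c] :: tokC cs
termination_by l.length
decreasing_by
  · exact Nat.lt_succ_of_le (List.length_dropWhile_le _ _)
  · exact Nat.lt_succ_self _

theorem altTokens_toList (l : List Char) :
    (altTokens l).map String.toList = tokC l := by
  induction l using tokC.induct with
  | case1 => simp [altTokens, tokC]
  | case2 c cs hd ih => rw [altTokens, tokC]; simp [hd, ih]
  | case3 c cs hd ih => rw [altTokens, tokC]; simp [hd, ih]

-- chars of ','.join of B's tokens
def JB (l : List Char) : List Char := PySem.Chars.join [','] (tokC l)

theorem tokC_ne_nil (l : List Char) (h : l ≠ []) : tokC l ≠ [] := by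
  rcases l with _ | ⟨c, cs⟩
  · exact absurd rfl h
  · rw [tokC]; split <;> simp

theorem JB_cons (c : Char) (cs rest tok : List Char)
    (htok : tokC (c :: cs) = tok :: tokC rest) (hrest : rest ≠ []) :
    JB (c :: cs) = tok ++ [','] ++ JB rest := by
  unfold JB
  rw [htok]
  rcases ht : tokC rest with _ | ⟨q, qs⟩
  · exact absurd ht (tokC_ne_nil rest hrest)
  · rw [PySem.Chars.join_cons_cons]

theorem head_dropWhile_false (p : Char → Bool) :
    ∀ (l : List Char) (d : Char) (ds : List Char), l.dropWhile p = d :: ds → p d = false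
  | [], _, _, h => by simp at h
  | c :: cs, d, ds, h => by
    rw [List.dropWhile_cons] at h
    by_cases hc : p c
    · rw [if_pos hc] at h
      exact head_dropWhile_false p cs d ds h
    · rw [if_neg hc] at h
      cases h
      simpa using hc

theorem JB_getLast (l : List Char) (h : l ≠ []) : (JB l).getLast? = l.getLast? := by
  induction l using tokC.induct with
  | case1 => exact absurd rfl h
  | case2 c cs hd ih =>
    rcases hr : cs.dropWhile PySem.Chars.isdigit with _ | ⟨d, ds⟩
    · have hcs : cs.takeWhile PySem.Chars.isdigit = cs := by
        have := List.takeWhile_append_dropWhile (p := PySem.Chars.isdigit) (l := cs)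
        simpa [hr] using this
      unfold JB
      rw [tokC]
      simp [hd, hr, hcs, tokC, PySem.Chars.join_singleton]
    · rw [hr] at ih
      have hsplit : c :: cs = (c :: cs.takeWhile PySem.Chars.isdigit) ++ (d :: ds) := by
        have := List.takeWhile_append_dropWhile (p := PySem.Chars.isdigit) (l := cs)
        rw [hr] at this
        simp [this]
      have hJB : JB (c :: cs)
          = (c :: cs.takeWhile PySem.Chars.isdigit) ++ [','] ++ JB (d :: ds) :=
        JB_cons c cs (d :: ds) _ (by rw [tokC]; simp [hd, hr]) (by simp)
      have hg := ih (by simp)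
      have hne : JB (d :: ds) ≠ [] := by
        intro hnil
        rw [hnil] at hg
        exact absurd hg.symm (by simp)
      rw [hJB, List.getLast?_append_of_ne_nil _ hne, hg]
      conv_rhs => rw [hsplit]
      rw [List.getLast?_append_of_ne_nil _ (by simp)]
  | case3 c cs hd ih =>
    rcases cs with _ | ⟨d, ds⟩
    · unfold JB
      rw [tokC]
      simp [hd, tokC, PySem.Chars.join_singleton]
    · have hJB : JB (c :: d :: ds) = [c] ++ [','] ++ JB (d :: ds) :=
        JB_cons c (d :: ds) (d :: ds) _ (by rw [tokC]; simp [hd]) (by simp)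
      have hg := ih (by simp)
      have hne : JB (d :: ds) ≠ [] := by
        intro hnil
        rw [hnil] at hg
        exact absurd hg.symm (by simp)
      rw [hJB, List.getLast?_append_of_ne_nil _ hne, hg, List.getLast?_cons_cons]

-- A's loop body as a recursion on the remaining characters, given the preDigit flag.
def gA (pre : Bool) (l : List Char) : List String :=
  match l with
  | [] => []
  | c :: cs =>
    if PySem.Chars.isdigit c then String.ofList [c] :: gA true cs
    else if pre then [",", String.ofList [c], ","] ++ gA false cs
    else [String.ofList [c], ","] ++ gA false cs

theorem foldA_eq_gA (l : List Char) (acc : List String) (pre : Bool) :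
    (l.foldl
      (fun (st : List String × Bool) (i : Char) =>
        if PySem.Chars.isdigit i then (st.1 ++ [String.ofList [i]], true)
        else if st.2 then (st.1 ++ [",", String.ofList [i], ","], false)
        else (st.1 ++ [String.ofList [i], ","], false))
      (acc, pre)).1 = acc ++ gA pre l := by
  induction l generalizing acc pre with
  | nil => simp [gA]
  | cons c cs ih =>
    simp only [List.foldl_cons, gA]
    by_cases hd : PySem.Chars.isdigit c
    · simp [hd, ih]
    · cases pre <;> simp [hd, ih]

theorem gA_true_of_digits (t r : List Char) (h : ∀ x ∈ t, PySem.Chars.isdigit x) :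
    gA true (t ++ r) = t.map (fun c => String.ofList [c]) ++ gA true r := by
  induction t with
  | nil => simp
  | cons c cs ih =>
    have hc := h c (by simp)
    simp [gA, hc, ih (fun x hx => h x (by simp [hx]))]

-- main invariant: A's accumulated list is B's joined char list,
-- plus a trailing comma unless l ends in a digit
theorem gA_false_eq (l : List Char) (a : Char) (hl : l.getLast? = some a) :
    gA false l = (JB l).map (fun c => String.ofList [c])
      ++ (if PySem.Chars.isdigit a then [] else [","]) := by
  induction l using tokC.induct generalizing a with
  | case1 => simp at hl
  | case2 c cs hd ih =>
    have hdigs : ∀ x ∈ cs.takeWhile PySem.Chars.isdigit, PySem.Chars.isdigit x :=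
      fun x hx => List.mem_takeWhile_imp hx
    rcases hr : cs.dropWhile PySem.Chars.isdigit with _ | ⟨d, ds⟩
    · -- the whole rest is one digit run
      have hcs : cs.takeWhile PySem.Chars.isdigit = cs := by
        have := List.takeWhile_append_dropWhile (p := PySem.Chars.isdigit) (l := cs)
        simpa [hr] using this
      rw [hcs] at hdigs
      have hada : PySem.Chars.isdigit a := by
        rcases List.mem_cons.mp (List.mem_of_getLast? hl) with rfl | ha
        · exact hd
        · exact hdigs a ha
      have h2 := gA_true_of_digits cs [] hdigs
      simp only [List.append_nil] at h2
      rw [gA, if_pos hd, h2]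
      unfold JB
      rw [tokC]
      simp [hd, hr, hcs, tokC, PySem.Chars.join_singleton, gA, hada]
    · rw [hr] at ih
      have hdfalse : PySem.Chars.isdigit d = false :=
        head_dropWhile_false PySem.Chars.isdigit cs d ds hr
      have hsplit : cs = cs.takeWhile PySem.Chars.isdigit ++ (d :: ds) := by
        have := List.takeWhile_append_dropWhile (p := PySem.Chars.isdigit) (l := cs)
        rw [hr] at this
        exact this.symm
      have hla : (d :: ds).getLast? = some a := by
        rw [← hl]
        conv_rhs => rw [show c :: cs = (c :: cs.takeWhile PySem.Chars.isdigit) ++ (d :: ds) by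
          simpa using hsplit]
        rw [List.getLast?_append_of_ne_nil _ (by simp)]
      have hgtrue : gA true (d :: ds) = "," :: gA false (d :: ds) := by
        rw [gA, gA]
        simp [hdfalse]
      have hJB : JB (c :: cs)
          = (c :: cs.takeWhile PySem.Chars.isdigit) ++ [','] ++ JB (d :: ds) :=
        JB_cons c cs (d :: ds) _ (by rw [tokC]; simp [hd, hr]) (by simp)
      rw [gA, if_pos hd]
      conv_lhs => rw [hsplit]
      rw [gA_true_of_digits _ _ hdigs, hgtrue, ih a hla, hJB]
      simp
  | case3 c cs hd ih =>
    rcases cs with _ | ⟨d, ds⟩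
    · simp only [List.getLast?_singleton, Option.some.injEq] at hl
      subst hl
      unfold JB
      rw [tokC]
      simp [hd, tokC, PySem.Chars.join_singleton, gA]
    · have hla : (d :: ds).getLast? = some a := by
        rw [← hl, List.getLast?_cons_cons]
      have hJB : JB (c :: d :: ds) = [c] ++ [','] ++ JB (d :: ds) :=
        JB_cons c (d :: ds) (d :: ds) _ (by rw [tokC]; simp [hd]) (by simp)
      rw [gA, if_neg (by simp [hd]), if_neg (by simp), ih a hla, hJB]
      simp

theorem toList_ne_nil (s : String) (h : s ≠ "") : s.toList ≠ [] := by
  intro hnil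
  exact h (by rw [← String.ofList_toList (s := s), hnil])

-- ===== VERDICT (by name: the statement is the Claim_ definition above) =====
theorem toOutput_spec : Claim_equal_toOutput := by
  intro instr _ hpre
  unfold Spec_toOutput
  simp only [toOutput, toOutput_alt]
  have hl : instr.toList ≠ [] := toList_ne_nil instr hpre
  rcases hlast : instr.toList.getLast? with _ | a
  · rw [List.getLast?_eq_none_iff] at hlast
    exact absurd hlast hl
  rw [foldA_eq_gA, List.nil_append, gA_false_eq instr.toList a hlast]
  rw [PySem.Str.toList_join, altTokens_toList]
  have hJ : PySem.Chars.join (",".toList) (tokC instr.toList) = JB instr.toList := by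
    unfold JB; rfl
  rw [hJ]
  by_cases hda : PySem.Chars.isdigit a
  · rw [if_pos hda, List.append_nil]
    rw [PySem.List.pyGet?_neg_one]
    have hlm : ((JB instr.toList).map (fun c => String.ofList [c])).getLast? =
        some (String.ofList [a]) := by
      rw [List.getLast?_map, JB_getLast instr.toList hl, hlast]
      rfl
    rw [hlm]
    have hne : String.ofList [a] ≠ "," := by
      intro hEq
      have hc := congrArg String.toList hEq
      simp at hc
      rw [hc] at hda
      exact absurd hda (by decide)
    simp [hne]
  · rw [if_neg hda]
    rw [PySem.List.pyGet?_neg_one]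
    rw [List.getLast?_append_of_ne_nil _ (by simp)]
    simp
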